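-- pv_equiv track=rewrite | github.com/flo-kei/ccc-40 | level4/c4.py | place_vertical_tables
-- ===== SOURCE A (Python) =====
-- def place_vertical_tables(matrix,x,y,z,currX,currY,deskindex):
--     currY = 0
--     while currY+2 < y:
--         for j in range(0,3):
--             if(currY >= y):
--                 break
--             matrix[currY][currX] = 1
--             currY+=1
--         currY+=1
--
--         deskindex+=1
--
--     return matrix,x,y,z,currX,currY,deskindex
-- ===== SOURCE B (Python) =====
-- def place_vertical_tables(matrix, x, y, z, currX, currY, deskindex):
--     # closed-form group count, then one flat modulo-gated pass (mutates matrix like A)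
--     n = max(0, (y + 1) // 4)
--     for r in range(4 * n):
--         if r % 4 != 3:
--             matrix[r][currX] = 1
--     return matrix, x, y, z, currX, 4 * n, deskindex + n
-- ===== Notes on version B (the rewrite author's own statement) =====
-- stated objective: simpler
-- what changed: Replaced the nested while/for group-of-3-then-skip loop with a closed-form group count n = max(0,(y+1)//4) and a single flat pass over range(4*n) gated by r % 4 != 3, returning currY = 4*n and deskindex + n directly.
import Mathlib
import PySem

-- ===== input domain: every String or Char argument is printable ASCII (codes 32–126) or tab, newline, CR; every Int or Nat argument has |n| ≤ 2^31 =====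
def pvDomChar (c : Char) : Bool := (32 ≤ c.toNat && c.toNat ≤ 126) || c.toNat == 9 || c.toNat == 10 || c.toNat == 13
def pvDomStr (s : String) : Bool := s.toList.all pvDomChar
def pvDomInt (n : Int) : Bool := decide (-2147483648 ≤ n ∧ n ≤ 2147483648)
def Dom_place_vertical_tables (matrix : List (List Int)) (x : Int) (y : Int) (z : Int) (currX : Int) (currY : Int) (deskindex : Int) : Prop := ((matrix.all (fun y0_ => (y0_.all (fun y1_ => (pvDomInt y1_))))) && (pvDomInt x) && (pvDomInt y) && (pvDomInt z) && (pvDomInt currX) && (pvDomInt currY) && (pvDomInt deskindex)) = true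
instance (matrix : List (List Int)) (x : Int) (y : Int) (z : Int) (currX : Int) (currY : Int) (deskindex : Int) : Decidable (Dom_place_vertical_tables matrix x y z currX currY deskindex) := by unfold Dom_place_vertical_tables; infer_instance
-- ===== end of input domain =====

-- B replaces A's nested group-of-3/skip-1 while loop by a closed-form group count and one
-- flat modulo-gated fill pass (objective: simpler).  Both Pythons mutate `matrix` in place
-- identically; the equivalence proved here is about the returned tuple.

-- ===== PORT A =====
-- shared write primitive: matrix[i][j] = v (total form; Pre_ keeps indices in range)
def pvCell (m : List (List Int)) (i j v : Int) : List (List Int) :=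
  PySem.List.pySetD m i (PySem.List.pySetD (PySem.List.pyGetD m i []) j v)

-- inner for-loop: for j in range(0,3): if currY >= y: break; matrix[currY][currX]=1; currY+=1
-- state: (matrix, currY, broke)
def pvInner (y currX : Int) (m : List (List Int)) (cy : Int) : List (List Int) × Int × Bool :=
  (PySem.List.pyRange 0 3 1).foldl
    (fun st _ =>
      if st.2.2 then st
      else if st.2.1 ≥ y then (st.1, st.2.1, true)
      else (pvCell st.1 st.2.1 currX 1, st.2.1 + 1, st.2.2))
    (m, cy, false)

-- used by the while-loop's termination proof (decreasing_by cites it)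
theorem pvInner_snd (y currX : Int) (m : List (List Int)) (cy : Int) (h : cy + 2 < y) :
    (pvInner y currX m cy).2.1 = cy + 3 := by
  have h0 : ¬ y ≤ cy := by omega
  have h1 : ¬ y ≤ cy + 1 := by omega
  have h2 : ¬ y ≤ cy + 2 := by omega
  have e2 : cy + 1 + 1 = cy + 2 := by ring
  have e3 : cy + 2 + 1 = cy + 3 := by ring
  simp [pvInner, PySem.List.pyRange, List.range_succ, h0, h1, h2, e2, e3]

-- while currY+2 < y: …
def pvWhile (y currX : Int) (m : List (List Int)) (cy d : Int) : List (List Int) × Int × Int :=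
  if h : cy + 2 < y then
    pvWhile y currX (pvInner y currX m cy).1 ((pvInner y currX m cy).2.1 + 1) (d + 1)
  else (m, cy, d)
termination_by (y - cy).toNat
decreasing_by
  have := pvInner_snd y currX m cy h
  omega

def place_vertical_tables (matrix : List (List Int)) (x : Int) (y : Int) (z : Int) (currX : Int) (currY : Int) (deskindex : Int) : List (List Int) × Int × Int × Int × Int × Int × Int :=
  let r := pvWhile y currX matrix 0 deskindex
  (r.1, x, y, z, currX, r.2.1, r.2.2)

-- ===== PORT B =====
def place_vertical_tables_alt (matrix : List (List Int)) (x : Int) (y : Int) (z : Int) (currX : Int) (currY : Int) (deskindex : Int) : List (List Int) × Int × Int × Int × Int × Int × Int :=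
  let n : Int := max 0 (PySem.Int.floordiv (y + 1) 4)
  let m := (PySem.List.pyRange 0 (4 * n) 1).foldl
    (fun acc r => if PySem.Int.mod r 4 ≠ 3 then pvCell acc r currX 1 else acc) matrix
  (m, x, y, z, currX, 4 * n, deskindex + n)

-- ===== PRECONDITION & SPEC =====
-- Pre_ excludes exactly the inputs where Python A raises IndexError: some written cell
-- (row r < 4*n-1 with r % 4 ≠ 3, column currX under Python's negative-index rule) is out of range.
def Pre_place_vertical_tables (matrix : List (List Int)) (x : Int) (y : Int) (z : Int) (currX : Int) (currY : Int) (deskindex : Int) : Prop :=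
  let n : Int := max 0 (PySem.Int.floordiv (y + 1) 4)
  n = 0 ∨ (4 * n - 1 ≤ (matrix.length : Int) ∧
    ∀ i : Nat, i < matrix.length → (i : Int) < 4 * n - 1 → i % 4 ≠ 3 →
      -((matrix.getD i []).length : Int) ≤ currX ∧ currX < ((matrix.getD i []).length : Int))
instance (matrix : List (List Int)) (x : Int) (y : Int) (z : Int) (currX : Int) (currY : Int) (deskindex : Int) : Decidable (Pre_place_vertical_tables matrix x y z currX currY deskindex) := by unfold Pre_place_vertical_tables; infer_instance

def pvWitness_place_vertical_tables : List (List Int) × Int × Int × Int × Int × Int × Int :=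
  ([[0, 0], [0, 0], [0, 0]], 2, 3, 0, 1, 0, 5)

def Spec_place_vertical_tables (matrix : List (List Int)) (x : Int) (y : Int) (z : Int) (currX : Int) (currY : Int) (deskindex : Int) (out : List (List Int) × Int × Int × Int × Int × Int × Int) : Prop := out = place_vertical_tables_alt matrix x y z currX currY deskindex
instance (matrix : List (List Int)) (x : Int) (y : Int) (z : Int) (currX : Int) (currY : Int) (deskindex : Int) (out : List (List Int) × Int × Int × Int × Int × Int × Int) : Decidable (Spec_place_vertical_tables matrix x y z currX currY deskindex out) := by unfold Spec_place_vertical_tables; infer_instance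

-- ===== CLAIM (what is proved, stated in full; the proofs are below) =====
def Claim_equal_place_vertical_tables : Prop := ∀ (matrix : List (List Int)) (x : Int) (y : Int) (z : Int) (currX : Int) (currY : Int) (deskindex : Int), Dom_place_vertical_tables matrix x y z currX currY deskindex → Pre_place_vertical_tables matrix x y z currX currY deskindex → Spec_place_vertical_tables matrix x y z currX currY deskindex (place_vertical_tables matrix x y z currX currY deskindex)

-- ===== LEMMAS AND PROOFS =====

-- B's fill pass, from row a up to row b
def pvFill (currX : Int) (m : List (List Int)) (a b : Int) : List (List Int) :=
  (PySem.List.pyRange a b 1).foldl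
    (fun acc r => if PySem.Int.mod r 4 ≠ 3 then pvCell acc r currX 1 else acc) m

-- remaining group count when the cursor is at cy
def pvG (y cy : Int) : Int := max 0 (PySem.Int.floordiv (y - cy + 1) 4)

theorem pvG_zero (y cy : Int) (h : ¬ cy + 2 < y) : pvG y cy = 0 := by
  have h4 : (0:Int) < 4 := by omega
  simp only [pvG, PySem.Int.floordiv_eq_ediv_of_pos h4]
  omega

theorem pvG_succ (y cy : Int) (h : cy + 2 < y) : pvG y cy = pvG y (cy + 4) + 1 := by
  have h4 : (0:Int) < 4 := by omega
  simp only [pvG, PySem.Int.floordiv_eq_ediv_of_pos h4]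
  omega

theorem pvG_nonneg (y cy : Int) : 0 ≤ pvG y cy := le_max_left _ _

theorem pvInner_eq (y currX : Int) (m : List (List Int)) (cy : Int) (h : cy + 2 < y) :
    pvInner y currX m cy =
      (pvCell (pvCell (pvCell m cy currX 1) (cy + 1) currX 1) (cy + 2) currX 1, cy + 3, false) := by
  have h0 : ¬ y ≤ cy := by omega
  have h1 : ¬ y ≤ cy + 1 := by omega
  have h2 : ¬ y ≤ cy + 2 := by omega
  have e2 : cy + 1 + 1 = cy + 2 := by ring
  have e3 : cy + 2 + 1 = cy + 3 := by ring
  simp [pvInner, PySem.List.pyRange, List.range_succ, h0, h1, h2, e2, e3]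

theorem pvFill_group (currX : Int) (m : List (List Int)) (k b : Int)
    (hk : k % 4 = 0) (hb : k + 4 ≤ b) :
    pvFill currX m k b =
      pvFill currX (pvCell (pvCell (pvCell m k currX 1) (k + 1) currX 1) (k + 2) currX 1) (k + 4) b := by
  have hsplit := PySem.List.pyRange_one_append k (k + 4) b (by omega) hb
  have h4 : (0:Int) < 4 := by omega
  have e1 : PySem.List.pyRange k (k+4) 1 = [k, k+1, k+1+1, k+1+1+1] := by
    rw [PySem.List.pyRange_one_cons (by omega), PySem.List.pyRange_one_cons (by omega),
        PySem.List.pyRange_one_cons (by omega), PySem.List.pyRange_one_cons (by omega),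
        PySem.List.pyRange_one_eq_nil (by omega)]
  have c0 : k % 4 ≠ 3 := by omega
  have c1 : (k+1) % 4 ≠ 3 := by omega
  have c2 : (k+1+1) % 4 ≠ 3 := by omega
  have c3 : (k+1+1+1) % 4 = 3 := by omega
  simp only [pvFill, hsplit, List.foldl_append, e1, List.foldl_cons, List.foldl_nil,
    PySem.Int.mod_eq_emod_of_pos h4]
  rw [if_pos c0, if_pos c1, if_pos c2, if_neg (by simp [c3])]
  congr 2 <;> ring

-- the while loop computes B's flat fill, final cursor and desk count
theorem pvWhile_eq (y currX : Int) (m : List (List Int)) (cy d : Int) (hk : cy % 4 = 0) :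
    pvWhile y currX m cy d = (pvFill currX m cy (cy + 4 * pvG y cy), cy + 4 * pvG y cy, d + pvG y cy) := by
  by_cases h : cy + 2 < y
  · rw [pvWhile, dif_pos h, pvInner_eq y currX m cy h]
    dsimp only
    have hG := pvG_succ y cy h
    have hGn := pvG_nonneg y (cy + 4)
    have IH := pvWhile_eq y currX
      (pvCell (pvCell (pvCell m cy currX 1) (cy + 1) currX 1) (cy + 2) currX 1)
      (cy + 4) (d + 1) (by omega)
    rw [show cy + 3 + 1 = cy + 4 from by ring, IH,
        pvFill_group currX m cy (cy + 4 * pvG y cy) hk (by omega)]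
    have harg : cy + 4 + 4 * pvG y (cy + 4) = cy + 4 * pvG y cy := by omega
    simp only [Prod.mk.injEq]
    exact ⟨by rw [harg], by omega, by omega⟩
  · rw [pvWhile, dif_neg h, pvG_zero y cy h]
    simp [pvFill]
termination_by (y - cy).toNat
decreasing_by omega

-- ===== VERDICT (by name: the statement is the Claim_ definition above) =====
theorem place_vertical_tables_spec : Claim_equal_place_vertical_tables := by
  intro matrix x y z currX currY deskindex _ _
  show _ = _
  simp only [place_vertical_tables, place_vertical_tables_alt,
    pvWhile_eq y currX matrix 0 deskindex (by omega)]
  simp only [pvG, pvFill, zero_add, sub_zero]
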